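-- pv_equiv track=rewrite | github.com/stenknutsen/HomeGrownPOSTagger | PhaseThreeTagging.py | V_RB_ing_VerbTagger
-- ===== SOURCE A (Python) =====
-- def V_RB_ing_VerbTagger(sent):
--     sentToReturn = []
--     skip = 0
--
--     for i in range(len(sent)):
--
--         if skip>0:
--             skip = skip -1
--             continue
--
--         if (i)<0 | (i+2)>=len(sent):
--             sentToReturn += [sent[i]]
--             continue
--
--         leftContext = sent[i]
--         target = sent[i+1]
--         rightContext = sent[i+2]
--
--         if (leftContext[1].startswith("V"))&((target[1]=="RB"))&(rightContext[0].lower().endswith("ing")):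
--
--             sentToReturn += [leftContext]
--             sentToReturn += [target]
--             sentToReturn += [(rightContext[0],"VBG")]
--             skip = 2
--
--         else:
--             sentToReturn += [leftContext]
--
--     return sentToReturn
-- ===== SOURCE B (Python) =====
-- def V_RB_ing_VerbTagger(sent):
--     n = len(sent)
--     retag = []
--     i = 0
--     while i + 2 < n:
--         if sent[i][1].startswith("V") and sent[i+1][1] == "RB" and sent[i+2][0].lower().endswith("ing"):
--             retag.append(i + 2)
--             i += 3
--         else:
--             i += 1
--     return [(w, "VBG") if j in retag else (w, t) for j, (w, t) in enumerate(sent)]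
-- ===== Notes on version B (the rewrite author's own statement) =====
-- stated objective: alternative
-- what changed: Replaced A's single interleaved emit-and-skip loop (skip counter, appends inside the scan) by a two-pass structure: a first pass collects the retag positions with the same greedy advance, and a second pass rebuilds the sentence by index membership.
import Mathlib
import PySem

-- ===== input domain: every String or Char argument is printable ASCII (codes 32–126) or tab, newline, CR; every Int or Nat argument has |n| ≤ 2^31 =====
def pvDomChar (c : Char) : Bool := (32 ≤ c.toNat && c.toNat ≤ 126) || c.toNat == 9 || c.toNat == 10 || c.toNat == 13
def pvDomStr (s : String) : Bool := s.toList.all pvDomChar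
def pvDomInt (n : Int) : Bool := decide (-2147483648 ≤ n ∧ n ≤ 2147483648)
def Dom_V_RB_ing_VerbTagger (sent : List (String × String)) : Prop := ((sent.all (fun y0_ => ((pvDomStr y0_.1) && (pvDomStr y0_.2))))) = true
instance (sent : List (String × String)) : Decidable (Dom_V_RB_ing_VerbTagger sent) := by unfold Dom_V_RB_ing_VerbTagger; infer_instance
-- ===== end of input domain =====

-- B replaces A's interleaved emit-and-skip loop by a two-pass structure (collect retag
-- positions with the same greedy skip, then rebuild by index); objective: alternative.

-- ===== PORT A =====
-- Python's `(i)<0 | (i+2)>=len(sent)` is the chained comparison `i < (0|(i+2)) and (0|(i+2)) >= len(sent)`,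
-- i.e. `i < i+2 ∧ i+2 ≥ len(sent)`; ported as exactly that conjunction.
-- Indices i, i+1, i+2 are only read when in range, so pyGetD's default is never used.
def V_RB_ing_VerbTagger (sent : List (String × String)) : List (String × String) :=
  ((PySem.List.pyRange 0 (sent.length) 1).foldl (fun st i =>
    let acc := st.1
    let skip := st.2
    if skip > 0 then (acc, skip - 1)
    else if i < i + 2 ∧ i + 2 ≥ (sent.length : Int) then
      (acc ++ [PySem.List.pyGetD sent i ("", "")], skip)
    else
      let leftContext := PySem.List.pyGetD sent i ("", "")
      let target := PySem.List.pyGetD sent (i + 1) ("", "")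
      let rightContext := PySem.List.pyGetD sent (i + 2) ("", "")
      if PySem.Str.startswith leftContext.2 "V" && (target.2 == "RB")
          && PySem.Str.endswith (PySem.Str.lower rightContext.1) "ing" then
        (acc ++ [leftContext] ++ [target] ++ [(rightContext.1, "VBG")], 2)
      else
        (acc ++ [leftContext], skip))
    ([], (0 : Int))).1

-- ===== PORT B =====
-- Pass 1 of Source B: the while loop collecting retag positions (as Python ints).
def pvAltLoop (sent : List (String × String)) (retag : List Int) (i : Nat) : List Int :=
  if h : i + 2 < sent.length then
    if PySem.Str.startswith (sent[i]'(by omega)).2 "V" && ((sent[i+1]'(by omega)).2 == "RB")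
        && PySem.Str.endswith (PySem.Str.lower (sent[i+2]'h).1) "ing" then
      pvAltLoop sent (retag ++ [(i : Int) + 2]) (i + 3)
    else
      pvAltLoop sent retag (i + 1)
  else retag
termination_by sent.length - i

-- Pass 2 of Source B: the comprehension over enumerate(sent).
def V_RB_ing_VerbTagger_alt (sent : List (String × String)) : List (String × String) :=
  let retag := pvAltLoop sent [] 0
  (PySem.List.enumerate sent).map (fun p => if retag.contains p.1 then (p.2.1, "VBG") else p.2)

-- ===== PRECONDITION & SPEC =====
def Spec_V_RB_ing_VerbTagger (sent : List (String × String)) (out : List (String × String)) : Prop := out = V_RB_ing_VerbTagger_alt sent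
instance (sent : List (String × String)) (out : List (String × String)) : Decidable (Spec_V_RB_ing_VerbTagger sent out) := by unfold Spec_V_RB_ing_VerbTagger; infer_instance

-- ===== CLAIM (what is proved, stated in full; the proofs are below) =====
def Claim_equal_V_RB_ing_VerbTagger : Prop := ∀ (sent : List (String × String)), Dom_V_RB_ing_VerbTagger sent → Spec_V_RB_ing_VerbTagger sent (V_RB_ing_VerbTagger sent)

-- ===== LEMMAS AND PROOFS =====

-- The shared match predicate, stated with getD (total).
def pvMatch (sent : List (String × String)) (i : Nat) : Bool :=
  PySem.Str.startswith (sent.getD i ("", "")).2 "V" && ((sent.getD (i+1) ("", "")).2 == "RB")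
    && PySem.Str.endswith (PySem.Str.lower (sent.getD (i+2) ("", "")).1) "ing"

-- Canonical description of the output from position i on.
def pvTail (sent : List (String × String)) (i : Nat) : List (String × String) :=
  if h : i + 2 < sent.length then
    if pvMatch sent i then
      (sent[i]'(by omega)) :: (sent[i+1]'(by omega)) :: ((sent[i+2]'h).1, "VBG") :: pvTail sent (i + 3)
    else
      (sent[i]'(by omega)) :: pvTail sent (i + 1)
  else sent.drop i
termination_by sent.length - i

-- Direct-style collected positions.
def pvCollect (sent : List (String × String)) (i : Nat) : List Int :=
  if h : i + 2 < sent.length then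
    if pvMatch sent i then ((i : Int) + 2) :: pvCollect sent (i + 3)
    else pvCollect sent (i + 1)
  else []
termination_by sent.length - i

theorem pvAltLoop_eq_collect (sent : List (String × String)) (retag : List Int) (i : Nat) :
    pvAltLoop sent retag i = retag ++ pvCollect sent i := by
  fun_induction pvAltLoop sent retag i with
  | case1 retag i h hm ih =>
    rw [ih]; conv_rhs => rw [pvCollect, dif_pos h]
    have hm' : pvMatch sent i = true := by
      simpa [pvMatch, List.getD_eq_getElem?_getD, List.getElem?_eq_getElem (show i < sent.length by omega),
        List.getElem?_eq_getElem (show i+1 < sent.length by omega), List.getElem?_eq_getElem h] using hm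
    rw [if_pos hm']; simp
  | case2 retag i h hm ih =>
    rw [ih]; conv_rhs => rw [pvCollect, dif_pos h]
    have hm' : pvMatch sent i = false := by
      simpa [pvMatch, List.getD_eq_getElem?_getD, List.getElem?_eq_getElem (show i < sent.length by omega),
        List.getElem?_eq_getElem (show i+1 < sent.length by omega), List.getElem?_eq_getElem h] using hm
    rw [if_neg (by simp [hm'])]
  | case3 retag i h =>
    conv_rhs => rw [pvCollect, dif_neg h]
    simp

theorem pvCollect_lb (sent : List (String × String)) (i : Nat) :
    ∀ j ∈ pvCollect sent i, (i : Int) + 2 ≤ j := by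
  fun_induction pvCollect sent i with
  | case1 i h hm ih =>
    intro j hj
    rcases List.mem_cons.mp hj with rfl | hj
    · omega
    · have := ih j hj; push_cast at this ⊢; omega
  | case2 i h hm ih =>
    intro j hj; have := ih j hj; push_cast at this ⊢; omega
  | case3 i h => intro j hj; simp at hj

-- A's loop body, named for the proofs (definitionally the lambda in the port).
def pvStepA (sent : List (String × String)) : (List (String × String) × Int) → Int → (List (String × String) × Int) :=
  fun st i =>
    let acc := st.1
    let skip := st.2
    if skip > 0 then (acc, skip - 1)
    else if i < i + 2 ∧ i + 2 ≥ (sent.length : Int) then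
      (acc ++ [PySem.List.pyGetD sent i ("", "")], skip)
    else
      let leftContext := PySem.List.pyGetD sent i ("", "")
      let target := PySem.List.pyGetD sent (i + 1) ("", "")
      let rightContext := PySem.List.pyGetD sent (i + 2) ("", "")
      if PySem.Str.startswith leftContext.2 "V" && (target.2 == "RB")
          && PySem.Str.endswith (PySem.Str.lower rightContext.1) "ing" then
        (acc ++ [leftContext] ++ [target] ++ [(rightContext.1, "VBG")], 2)
      else
        (acc ++ [leftContext], skip)

theorem pvStepA_def (sent : List (String × String)) (st : List (String × String) × Int) (i : Int) :
    pvStepA sent st i =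
      if st.2 > 0 then (st.1, st.2 - 1)
      else if i < i + 2 ∧ i + 2 ≥ (sent.length : Int) then
        (st.1 ++ [PySem.List.pyGetD sent i ("", "")], st.2)
      else if PySem.Str.startswith (PySem.List.pyGetD sent i ("", "")).2 "V"
            && ((PySem.List.pyGetD sent (i + 1) ("", "")).2 == "RB")
            && PySem.Str.endswith (PySem.Str.lower (PySem.List.pyGetD sent (i + 2) ("", "")).1) "ing" then
        (st.1 ++ [PySem.List.pyGetD sent i ("", "")] ++ [PySem.List.pyGetD sent (i + 1) ("", "")]
          ++ [((PySem.List.pyGetD sent (i + 2) ("", "")).1, "VBG")], 2)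
      else (st.1 ++ [PySem.List.pyGetD sent i ("", "")], st.2) := rfl

theorem pvGetD_cast (sent : List (String × String)) (k c : Nat) :
    PySem.List.pyGetD sent ((k : Int) + (c : Nat)) ("", "") = sent.getD (k + c) ("", "") := by
  have : ((k : Int) + (c : Nat)) = ((k + c : Nat) : Int) := by push_cast; ring
  rw [this, PySem.List.pyGetD_natCast]

-- The match condition of the step, as pvMatch.
theorem pvStepA_cond (sent : List (String × String)) (i : Nat) :
    (PySem.Str.startswith (PySem.List.pyGetD sent ((i : Int)) ("", "")).2 "V"
      && ((PySem.List.pyGetD sent ((i : Int) + 1) ("", "")).2 == "RB")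
      && PySem.Str.endswith (PySem.Str.lower (PySem.List.pyGetD sent ((i : Int) + 2) ("", "")).1) "ing")
      = pvMatch sent i := by
  have h0 := pvGetD_cast sent i 0
  have h1 := pvGetD_cast sent i 1
  have h2 := pvGetD_cast sent i 2
  simp only [Nat.cast_ofNat, Nat.cast_zero, Nat.cast_one, add_zero] at h0 h1 h2
  rw [h0, h1, h2]; rfl

theorem pvStepA_two (sent : List (String × String)) (a : List (String × String)) (i : Int) :
    pvStepA sent (a, 2) i = (a, 1) := by rw [pvStepA_def]; norm_num

theorem pvStepA_one (sent : List (String × String)) (a : List (String × String)) (i : Int) :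
    pvStepA sent (a, 1) i = (a, 0) := by rw [pvStepA_def]; norm_num

-- A's loop from index i with skip = 0 appends exactly pvTail sent i.
theorem pvA_loop_eq (sent : List (String × String)) (i : Nat) (acc : List (String × String)) :
    ((PySem.List.pyRange (i : Int) (sent.length) 1).foldl (pvStepA sent) (acc, (0 : Int))).1
      = acc ++ pvTail sent i := by
  by_cases hlt : i < sent.length
  · have g0 : PySem.List.pyGetD sent ((i : Int)) ("", "") = sent.getD i ("", "") :=
      PySem.List.pyGetD_natCast sent i ("", "")
    by_cases h2 : i + 2 < sent.length
    · by_cases hm : pvMatch sent i = true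
      · -- triple match : three elements consumed, skip 2 then 1 then 0
        have s1 : pvStepA sent (acc, 0) (i : Int)
            = (acc ++ [sent.getD i ("", "")] ++ [sent.getD (i+1) ("", "")]
                ++ ((sent.getD (i+2) ("", "")).1, "VBG") :: [], 2) := by
          rw [pvStepA_def, if_neg (by norm_num), if_neg (by push_cast; omega), pvStepA_cond,
            if_pos hm]
          have h1 := pvGetD_cast sent i 1
          have h2' := pvGetD_cast sent i 2
          simp only [Nat.cast_one, Nat.cast_ofNat] at h1 h2'
          rw [h1, h2']
          simp [g0]
        rw [PySem.List.pyRange_one_cons (by push_cast; omega),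
            PySem.List.pyRange_one_cons (a := (i : Int) + 1) (by push_cast; omega),
            PySem.List.pyRange_one_cons (a := (i : Int) + 1 + 1) (by push_cast; omega)]
        simp only [List.foldl_cons]
        rw [s1, pvStepA_two, pvStepA_one]
        have : ((i : Int) + 1 + 1 + 1) = ((i + 3 : Nat) : Int) := by push_cast; ring
        rw [this, pvA_loop_eq sent (i + 3)]
        have tA : pvTail sent i = (sent[i]'(by omega)) :: (sent[i+1]'(by omega))
            :: ((sent[i+2]'h2).1, "VBG") :: pvTail sent (i + 3) := by
          rw [pvTail, dif_pos h2, if_pos hm]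
        rw [tA]
        simp [List.getD_eq_getElem?_getD, List.getElem?_eq_getElem (show i < sent.length by omega),
          List.getElem?_eq_getElem (show i + 1 < sent.length by omega), List.getElem?_eq_getElem h2]
      · -- no match : copy one element
        have s1 : pvStepA sent (acc, 0) (i : Int) = (acc ++ [sent.getD i ("", "")], 0) := by
          rw [pvStepA_def, if_neg (by norm_num), if_neg (by push_cast; omega), pvStepA_cond,
            if_neg (by simpa using hm)]
          simp [g0]
        rw [PySem.List.pyRange_one_cons (by push_cast; omega)]
        simp only [List.foldl_cons]
        rw [s1]
        have : ((i : Int) + 1) = ((i + 1 : Nat) : Int) := by push_cast; ring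
        rw [this, pvA_loop_eq sent (i + 1)]
        have tA : pvTail sent i = (sent[i]'(by omega)) :: pvTail sent (i + 1) := by
          rw [pvTail, dif_pos h2, if_neg (by simpa using hm)]
        rw [tA]
        simp [List.getD_eq_getElem?_getD, List.getElem?_eq_getElem (show i < sent.length by omega)]
    · -- i < n ≤ i + 2 : boundary branch, element copied unchanged
      have s1 : pvStepA sent (acc, 0) (i : Int) = (acc ++ [sent.getD i ("", "")], 0) := by
        rw [pvStepA_def, if_neg (by norm_num), if_pos (by constructor <;> [omega; (push_cast; omega)])]
        simp [g0]
      rw [PySem.List.pyRange_one_cons (by push_cast; omega)]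
      simp only [List.foldl_cons]
      rw [s1]
      have : ((i : Int) + 1) = ((i + 1 : Nat) : Int) := by push_cast; ring
      rw [this, pvA_loop_eq sent (i + 1)]
      have tA : pvTail sent i = List.drop i sent := by rw [pvTail, dif_neg h2]
      have tB : pvTail sent (i + 1) = List.drop (i + 1) sent := by
        rw [pvTail, dif_neg (by omega)]
      rw [tA, tB, List.drop_eq_getElem_cons hlt]
      simp [List.getD_eq_getElem?_getD, List.getElem?_eq_getElem hlt]
  · rw [PySem.List.pyRange_one_eq_nil (by push_cast; omega)]
    rw [pvTail, dif_neg (by omega), List.drop_eq_nil_of_le (by omega)]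
    simp
termination_by sent.length - i

-- The rebuild pass applied to a suffix, with a set pre ++ pvCollect i whose 'pre' part lies below i.
theorem pvB_map_eq (sent : List (String × String)) (i : Nat) (pre : List Int)
    (hpre : ∀ j ∈ pre, j < (i : Int)) :
    (PySem.List.enumerate (sent.drop i) i).map
      (fun p => if (pre ++ pvCollect sent i).contains p.1 then (p.2.1, "VBG") else p.2)
      = pvTail sent i := by
  by_cases h2 : i + 2 < sent.length
  · have e0 : sent.drop i = (sent[i]'(by omega)) :: sent.drop (i+1) := List.drop_eq_getElem_cons (by omega)
    have e1 : sent.drop (i+1) = (sent[i+1]'(by omega)) :: sent.drop (i+2) := List.drop_eq_getElem_cons (by omega)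
    have e2 : sent.drop (i+2) = (sent[i+2]'h2) :: sent.drop (i+3) := List.drop_eq_getElem_cons h2
    by_cases hm : pvMatch sent i = true
    · rw [pvTail, dif_pos h2, if_pos hm, pvCollect, dif_pos h2, if_pos hm]
      rw [e0, e1, e2]
      simp only [PySem.List.enumerate_cons, List.map_cons]
      have hlb := pvCollect_lb sent (i+3)
      have hc0 : (pre ++ (((i:Int)+2) :: pvCollect sent (i+3))).contains (i : Int) = false := by
        simp only [List.contains_eq_mem, decide_eq_false_iff_not, List.mem_append, List.mem_cons]
        rintro (h | h | h)
        · exact absurd (hpre _ h) (by omega)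
        · omega
        · have := hlb _ h; push_cast at this; omega
      have hc1 : (pre ++ (((i:Int)+2) :: pvCollect sent (i+3))).contains ((i : Int)+1) = false := by
        simp only [List.contains_eq_mem, decide_eq_false_iff_not, List.mem_append, List.mem_cons]
        rintro (h | h | h)
        · have := hpre _ h; omega
        · omega
        · have := hlb _ h; push_cast at this; omega
      have hc2 : (pre ++ (((i:Int)+2) :: pvCollect sent (i+3))).contains ((i : Int)+1+1) = true := by
        simp only [List.contains_eq_mem, decide_eq_true_eq, List.mem_append, List.mem_cons]
        right; left; ring
      rw [hc0, hc1, hc2]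
      have hrec := pvB_map_eq sent (i+3) (pre ++ [(i:Int)+2])
        (by intro j hj; rcases List.mem_append.mp hj with h | h
            · have := hpre _ h; push_cast; omega
            · simp at h; push_cast; omega)
      have hassoc : (pre ++ [(i:Int)+2]) ++ pvCollect sent (i+3)
          = pre ++ (((i:Int)+2) :: pvCollect sent (i+3)) := by simp
      rw [hassoc] at hrec
      have : ((i:Int) + 1 + 1 + 1) = ((i+3 : Nat) : Int) := by push_cast; ring
      rw [this, hrec]
      simp
    · rw [pvTail, dif_pos h2, if_neg hm, pvCollect, dif_pos h2, if_neg hm]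
      rw [e0]
      simp only [PySem.List.enumerate_cons, List.map_cons]
      have hlb := pvCollect_lb sent (i+1)
      have hc0 : (pre ++ pvCollect sent (i+1)).contains (i : Int) = false := by
        simp only [List.contains_eq_mem, decide_eq_false_iff_not, List.mem_append]
        rintro (h | h)
        · exact absurd (hpre _ h) (by omega)
        · have := hlb _ h; push_cast at this; omega
      rw [hc0]
      have hrec := pvB_map_eq sent (i+1) pre
        (by intro j hj; have := hpre _ hj; push_cast; omega)
      have : ((i:Int) + 1) = ((i+1 : Nat) : Int) := by push_cast; ring
      rw [this, hrec]
      simp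
  · rw [pvTail, dif_neg h2, pvCollect, dif_neg h2, List.append_nil]
    -- every index in the suffix is ≥ i, every element of pre is < i
    have : ∀ (l : List (String × String)) (s : Int), (∀ j ∈ pre, j < s) →
        (PySem.List.enumerate l s).map
          (fun p => if pre.contains p.1 then (p.2.1, "VBG") else p.2) = l := by
      intro l
      induction l with
      | nil => intro s _; rfl
      | cons x xs ih =>
        intro s hs
        rw [PySem.List.enumerate_cons]
        simp only [List.map_cons]
        have hc : pre.contains s = false := by
          simp only [List.contains_eq_mem, decide_eq_false_iff_not]
          intro h; exact absurd (hs _ h) (by omega)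
        rw [hc, ih (s+1) (by intro j hj; have := hs _ hj; omega)]
        simp
    exact this _ _ hpre
termination_by sent.length - i

-- ===== VERDICT (by name: the statement is the Claim_ definition above) =====
theorem V_RB_ing_VerbTagger_spec : Claim_equal_V_RB_ing_VerbTagger := by
  intro sent _
  have hA : V_RB_ing_VerbTagger sent = pvTail sent 0 := by
    have h := pvA_loop_eq sent 0 []
    simpa using h
  have hB : V_RB_ing_VerbTagger_alt sent = pvTail sent 0 := by
    show (PySem.List.enumerate sent 0).map
      (fun p => if (pvAltLoop sent [] 0).contains p.1 then (p.2.1, "VBG") else p.2) = _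
    rw [pvAltLoop_eq_collect]
    have h := pvB_map_eq sent 0 [] (by intro j hj; simp at hj)
    simpa using h
  show V_RB_ing_VerbTagger sent = V_RB_ing_VerbTagger_alt sent
  rw [hA, hB]
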